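-- pv_equiv track=rewrite | github.com/shadowrk/DBMS | Select.py | getFilterData
-- ===== SOURCE A (Python) =====
-- def getFilterData(all_data, filters, param):
--     new_data = list()
--     if param == '!=':
--         for data in all_data:
--             if not data[filters[0]] == filters[1]:
--                 new_data.append(data)
--         return new_data
--     elif param == '>=':
--         for data in all_data:
--             if data[filters[0]] >= filters[1]:
--                 new_data.append(data)
--         return new_data
--     elif param == '<=':
--         for data in all_data:
--             if data[filters[0]] <= filters[1]:
--                 new_data.append(data)
--         return new_data
--     elif param == '>':
--         for data in all_data:
--             if data[filters[0]] > filters[1]: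
--                 new_data.append(data)
--         return new_data
--     elif param == '<':
--         for data in all_data:
--             if data[filters[0]] < filters[1]:
--                 new_data.append(data)
--         return new_data
--     elif param == '=':
--         for data in all_data:
--             if data[filters[0]] == filters[1]:
--                 new_data.append(data)
--         return new_data
--     else:
--         return all_data
-- ===== SOURCE B (Python) =====
-- def getFilterData(all_data, filters, param):
--     # Arithmetical formulation: reduce every comparison to the three-valued
--     # sign of (value vs reference) and index a per-operator truth table by it.
--     # table[param][s+1] says whether sign s in {-1,0,1} passes the filter.
--     table = {
--         '<':  (1, 0, 0),
--         '<=': (1, 1, 0),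
--         '=':  (0, 1, 0),
--         '!=': (1, 0, 1),
--         '>=': (0, 1, 1),
--         '>':  (0, 0, 1),
--     }
--     if param not in table:
--         return all_data
--     allowed = table[param]
--     key, ref = filters
--     return [row for row in all_data
--             if allowed[(row[key] > ref) - (row[key] < ref) + 1]]
-- ===== Notes on version B (the rewrite author's own statement) =====
-- stated objective: alternative
-- what changed: Replaced the six duplicated operator-specific append loops by an arithmetical formulation: each row's value is reduced to the three-valued comparison sign against the reference, and a per-operator sign truth-table indexed by sign+1 decides membership in one comprehension.
import Mathlib
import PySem

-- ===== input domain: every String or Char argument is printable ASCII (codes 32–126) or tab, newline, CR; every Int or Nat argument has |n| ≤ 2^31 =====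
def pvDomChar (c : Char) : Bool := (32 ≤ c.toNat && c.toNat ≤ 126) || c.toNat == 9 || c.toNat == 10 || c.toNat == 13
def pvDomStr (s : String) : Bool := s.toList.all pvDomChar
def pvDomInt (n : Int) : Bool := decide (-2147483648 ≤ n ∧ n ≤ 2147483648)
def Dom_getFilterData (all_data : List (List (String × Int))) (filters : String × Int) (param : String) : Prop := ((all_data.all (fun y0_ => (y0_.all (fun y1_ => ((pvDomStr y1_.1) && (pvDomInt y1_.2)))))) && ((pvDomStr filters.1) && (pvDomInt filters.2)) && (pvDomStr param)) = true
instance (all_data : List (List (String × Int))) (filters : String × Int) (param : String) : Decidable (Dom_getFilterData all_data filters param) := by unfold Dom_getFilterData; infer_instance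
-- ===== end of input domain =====

-- B replaces A's six duplicated operator-specific append loops by a three-valued comparison
-- sign indexing a per-operator truth table; return values proved equal on rows containing the key.

-- ===== PORT A =====
-- row[k] for a Python dict row: first match; Pre_ guarantees the key is present.
def pvRowGet (row : List (String × Int)) (k : String) : Int :=
  (List.lookup k row).getD 0

def getFilterData (all_data : List (List (String × Int))) (filters : String × Int) (param : String) : List (List (String × Int)) :=
  if param == "!=" then
    all_data.foldl (fun acc d => if !(pvRowGet d filters.1 == filters.2) then acc ++ [d] else acc) []
  else if param == ">=" then
    all_data.foldl (fun acc d => if pvRowGet d filters.1 ≥ filters.2 then acc ++ [d] else acc) []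
  else if param == "<=" then
    all_data.foldl (fun acc d => if pvRowGet d filters.1 ≤ filters.2 then acc ++ [d] else acc) []
  else if param == ">" then
    all_data.foldl (fun acc d => if pvRowGet d filters.1 > filters.2 then acc ++ [d] else acc) []
  else if param == "<" then
    all_data.foldl (fun acc d => if pvRowGet d filters.1 < filters.2 then acc ++ [d] else acc) []
  else if param == "=" then
    all_data.foldl (fun acc d => if pvRowGet d filters.1 = filters.2 then acc ++ [d] else acc) []
  else
    all_data

-- ===== PORT B =====
-- table[param] = (pass on sign -1, pass on sign 0, pass on sign 1)
def pvSignTable : List (String × (Bool × Bool × Bool)) :=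
  [ ("<",  (true,  false, false)),
    ("<=", (true,  true,  false)),
    ("=",  (false, true,  false)),
    ("!=", (true,  false, true)),
    (">=", (false, true,  true)),
    (">",  (false, false, true)) ]

-- allowed[(v > ref) - (v < ref) + 1] : tuple indexed by the comparison sign + 1
def pvSignPick (allowed : Bool × Bool × Bool) (v ref : Int) : Bool :=
  let i : Int := (if v > ref then 1 else 0) - (if v < ref then 1 else 0) + 1
  if i = 0 then allowed.1 else if i = 1 then allowed.2.1 else allowed.2.2

def getFilterData_alt (all_data : List (List (String × Int))) (filters : String × Int) (param : String) : List (List (String × Int)) :=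
  match List.lookup param pvSignTable with
  | none => all_data
  | some allowed => all_data.filter (fun row => pvSignPick allowed (pvRowGet row filters.1) filters.2)

-- ===== PRECONDITION & SPEC =====
-- Pre_ excludes exactly the KeyError inputs: when param is one of the six operators,
-- every row must contain the key filters.1 (otherwise Python A raises KeyError; B raises too).
def Pre_getFilterData (all_data : List (List (String × Int))) (filters : String × Int) (param : String) : Prop :=
  param ∈ ["!=", ">=", "<=", ">", "<", "="] →
    ∀ row ∈ all_data, (List.lookup filters.1 row).isSome
instance (all_data : List (List (String × Int))) (filters : String × Int) (param : String) : Decidable (Pre_getFilterData all_data filters param) := by unfold Pre_getFilterData; infer_instance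

def pvWitness_getFilterData : (List (List (String × Int))) × (String × Int) × String :=
  ([[("a", 1)], [("a", 3)]], ("a", 2), ">=")

def Spec_getFilterData (all_data : List (List (String × Int))) (filters : String × Int) (param : String) (out : List (List (String × Int))) : Prop := out = getFilterData_alt all_data filters param
instance (all_data : List (List (String × Int))) (filters : String × Int) (param : String) (out : List (List (String × Int))) : Decidable (Spec_getFilterData all_data filters param out) := by unfold Spec_getFilterData; infer_instance

-- ===== CLAIM (what is proved, stated in full; the proofs are below) =====
def Claim_equal_getFilterData : Prop := ∀ (all_data : List (List (String × Int))) (filters : String × Int) (param : String), Dom_getFilterData all_data filters param → Pre_getFilterData all_data filters param → Spec_getFilterData all_data filters param (getFilterData all_data filters param)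

-- ===== LEMMAS AND PROOFS =====
theorem pvFoldlFlipFilter {α : Type} (l : List α) (p : α → Prop) [DecidablePred p] (acc : List α) :
    l.foldl (fun acc d => if p d then acc else acc ++ [d]) acc = acc ++ l.filter (fun d => !decide (p d)) := by
  induction l generalizing acc with
  | nil => simp
  | cons hd tl ih => by_cases h : p hd <;> simp [List.filter, h, ih]

theorem pvPick_ne (v r : Int) : pvSignPick (true, false, true) v r = !(v == r) := by
  unfold pvSignPick
  split_ifs <;> simp_all <;> omega
theorem pvPick_ge (v r : Int) : pvSignPick (false, true, true) v r = decide (v ≥ r) := by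
  unfold pvSignPick
  split_ifs <;> simp_all <;> omega
theorem pvPick_le (v r : Int) : pvSignPick (true, true, false) v r = decide (v ≤ r) := by
  unfold pvSignPick
  split_ifs <;> simp_all <;> omega
theorem pvPick_gt (v r : Int) : pvSignPick (false, false, true) v r = decide (v > r) := by
  unfold pvSignPick
  split_ifs <;> simp_all <;> omega
theorem pvPick_lt (v r : Int) : pvSignPick (true, false, false) v r = decide (v < r) := by
  unfold pvSignPick
  split_ifs <;> simp_all <;> omega
theorem pvPick_eq (v r : Int) : pvSignPick (false, true, false) v r = decide (v = r) := by
  unfold pvSignPick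
  split_ifs <;> simp_all <;> omega

-- ===== VERDICT (by name: the statement is the Claim_ definition above) =====
theorem getFilterData_spec : Claim_equal_getFilterData := by
  intro all_data filters param _ _
  unfold Spec_getFilterData getFilterData getFilterData_alt
  by_cases h1 : "!=" = param
  · subst h1
    simp [pvSignTable, List.lookup, pvFoldlFlipFilter, pvPick_ne]
    exact List.filter_congr fun d _ => by rw [decide_eq_decide.mpr beq_iff_eq.symm, Bool.decide_coe]
  by_cases h2 : ">=" = param
  · subst h2
    simp [pvSignTable, List.lookup, PySem.List.foldl_append_ite_eq_filter, pvPick_ge]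
  by_cases h3 : "<=" = param
  · subst h3
    simp [pvSignTable, List.lookup, PySem.List.foldl_append_ite_eq_filter, pvPick_le]
  by_cases h4 : ">" = param
  · subst h4
    simp [pvSignTable, List.lookup, PySem.List.foldl_append_ite_eq_filter, pvPick_gt]
  by_cases h5 : "<" = param
  · subst h5
    simp [pvSignTable, List.lookup, PySem.List.foldl_append_ite_eq_filter, pvPick_lt]
  by_cases h6 : "=" = param
  · subst h6
    simp [pvSignTable, List.lookup, PySem.List.foldl_append_ite_eq_filter, pvPick_eq]
  · have e1 : (param == "!=") = false := beq_eq_false_iff_ne.mpr (Ne.symm h1)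
    have e2 : (param == ">=") = false := beq_eq_false_iff_ne.mpr (Ne.symm h2)
    have e3 : (param == "<=") = false := beq_eq_false_iff_ne.mpr (Ne.symm h3)
    have e4 : (param == ">") = false := beq_eq_false_iff_ne.mpr (Ne.symm h4)
    have e5 : (param == "<") = false := beq_eq_false_iff_ne.mpr (Ne.symm h5)
    have e6 : (param == "=") = false := beq_eq_false_iff_ne.mpr (Ne.symm h6)
    simp [pvSignTable, List.lookup, e1, e2, e3, e4, e5, e6,
      Ne.symm h1, Ne.symm h2, Ne.symm h3, Ne.symm h4, Ne.symm h5, Ne.symm h6]
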